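-- pv_equiv track=rewrite | github.com/rosteeslove/bsuir-4th-term-python-stuff | google_foobar/third_task/the-grandest-staircase-of-them-all/solution.py | wrong
-- ===== SOURCE A (Python) =====
-- def wrong(x):
--     """The first try."""
--     table = [[0 for _ in range(x+1)] for __ in range(x+1)]
--     table[2][1] = 1
--     for m in range(3, x):
--         for n in range(1, x):
--             if n >= m:
--                 for i in range(1+n-m, m):
--                     table[m][n] += table[i][n-i]
--             else:
--                 table[m][n] = 1 + table[n][n]
--
--             if table[m][n] == 0:
--                 break
--
--     result = 0
--     for i in range(1, x):
--         result += table[i][x - i]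
--
--     return result
-- ===== SOURCE B (Python) =====
-- def wrong(x):
--     """Same values as A, but each inner summation over an anti-diagonal is
--     replaced by an O(1) difference of incrementally maintained prefix sums
--     (P[n][i] = sum of T[k][n-k] for k <= i), giving O(x^2) instead of O(x^3)."""
--     T = [[0] * (x + 1) for _ in range(x + 1)]
--     T[2][1] = 1
--     P = [[0] * (x + 1) for _ in range(x + 1)]
--     for m in range(3, x):
--         # extend every diagonal's prefix sums with row m-1 (now final)
--         for n in range(x + 1):
--             j = n - (m - 1)
--             P[n][m - 1] = P[n][m - 2] + (T[m - 1][j] if 0 <= j <= x else 0)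
--         for n in range(1, x):
--             if n >= m:
--                 v = P[n][m - 1] - P[n][n - m] if n <= 2 * m - 2 else 0
--             else:
--                 v = 1 + T[n][n]
--             T[m][n] = v
--             if v == 0:
--                 break
--     result = 0
--     for i in range(1, x):
--         result += T[i][x - i]
--     return result
-- ===== Notes on version B (the rewrite author's own statement) =====
-- stated objective: faster
-- what changed: B maintains per-anti-diagonal prefix sums (extended with one row per outer iteration) so that A's inner summation loop over table[i][n-i] becomes an O(1) difference of two prefix sums; the row fill and its early break are kept.
import Mathlib
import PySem

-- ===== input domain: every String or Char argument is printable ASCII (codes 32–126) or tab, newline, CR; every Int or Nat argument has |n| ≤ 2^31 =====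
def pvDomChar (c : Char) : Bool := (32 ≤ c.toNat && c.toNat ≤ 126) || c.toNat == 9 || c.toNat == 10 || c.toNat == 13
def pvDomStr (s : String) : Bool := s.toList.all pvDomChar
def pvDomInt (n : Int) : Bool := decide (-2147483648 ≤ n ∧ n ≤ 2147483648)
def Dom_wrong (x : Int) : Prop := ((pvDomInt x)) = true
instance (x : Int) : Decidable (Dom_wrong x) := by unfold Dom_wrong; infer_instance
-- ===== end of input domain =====

-- B replaces A's inner anti-diagonal summation loop by an O(1) difference of
-- incrementally maintained per-diagonal prefix sums (O(x^2) instead of O(x^3)).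
-- Tables are Python lists of lists; reads/writes t[a][b] are ported with the
-- total forms pyGetD/pySetD (exact under Pre_: every access is in range there).

-- t[a][b] and t[a][b] = v on a list-of-lists table
def tget (t : List (List Int)) (a b : Int) : Int :=
  PySem.List.pyGetD (PySem.List.pyGetD t a []) b 0

def tset (t : List (List Int)) (a b v : Int) : List (List Int) :=
  PySem.List.pySetD t a (PySem.List.pySetD (PySem.List.pyGetD t a []) b v)

-- ===== PORT A =====
-- inner 'for n in range(1, x)' loop with its break
def wrongInner (m : Int) : List Int → List (List Int) → List (List Int)
  | [], t => t
  | n :: rest, t =>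
    let v : Int :=
      if m ≤ n then
        (PySem.List.pyRange (1 + n - m) m 1).foldl (fun s i => s + tget t i (n - i)) (tget t m n)
      else 1 + tget t n n
    let t' := tset t m n v
    if v = 0 then t' else wrongInner m rest t'

def wrong (x : Int) : Int :=
  let t0 := (PySem.List.pyRange 0 (x + 1) 1).map
    (fun _ => (PySem.List.pyRange 0 (x + 1) 1).map (fun _ => (0 : Int)))
  let t1 := tset t0 2 1 1
  let t2 := (PySem.List.pyRange 3 x 1).foldl
    (fun t m => wrongInner m (PySem.List.pyRange 1 x 1) t) t1
  (PySem.List.pyRange 1 x 1).foldl (fun r i => r + tget t2 i (x - i)) 0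

-- ===== PORT B =====
-- inner 'for n in range(1, x)' loop: O(1) prefix-sum difference, same break
def wrongAltInner (m : Int) (P : List (List Int)) : List Int → List (List Int) → List (List Int)
  | [], T => T
  | n :: rest, T =>
    let v : Int :=
      if m ≤ n then (if n ≤ 2 * m - 2 then tget P n (m - 1) - tget P n (n - m) else 0)
      else 1 + tget T n n
    let T' := tset T m n v
    if v = 0 then T' else wrongAltInner m P rest T'

-- one iteration of the m-loop: extend every diagonal's prefix sums with row m-1,
-- then fill row m
def pvStep (x : Int) (st : List (List Int) × List (List Int)) (m : Int) :
    List (List Int) × List (List Int) :=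
  let P' := (PySem.List.pyRange 0 (x + 1) 1).foldl
    (fun P n => tset P n (m - 1)
      (tget P n (m - 2) +
        (if 0 ≤ n - (m - 1) ∧ n - (m - 1) ≤ x then tget st.1 (m - 1) (n - (m - 1)) else 0)))
    st.2
  (wrongAltInner m P' (PySem.List.pyRange 1 x 1) st.1, P')

def wrong_alt (x : Int) : Int :=
  let T0 := tset ((PySem.List.pyRange 0 (x + 1) 1).map
    (fun _ => (PySem.List.pyRange 0 (x + 1) 1).map (fun _ => (0 : Int)))) 2 1 1
  let P0 := (PySem.List.pyRange 0 (x + 1) 1).map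
    (fun _ => (PySem.List.pyRange 0 (x + 1) 1).map (fun _ => (0 : Int)))
  let st := (PySem.List.pyRange 3 x 1).foldl (fun st m => pvStep x st m) (T0, P0)
  (PySem.List.pyRange 1 x 1).foldl (fun r i => r + tget st.1 i (x - i)) 0

-- ===== PRECONDITION & SPEC =====
-- Python A raises IndexError for x < 2 (the (x+1)x(x+1) table has no cell [2][1]).
def Pre_wrong (x : Int) : Prop := 2 ≤ x
instance (x : Int) : Decidable (Pre_wrong x) := by unfold Pre_wrong; infer_instance
def pvWitness_wrong : Int := 5

def Spec_wrong (x : Int) (out : Int) : Prop := out = wrong_alt x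
instance (x : Int) (out : Int) : Decidable (Spec_wrong x out) := by unfold Spec_wrong; infer_instance

-- ===== CLAIM (what is proved, stated in full; the proofs are below) =====
def Claim_equal_wrong : Prop := ∀ (x : Int), Dom_wrong x → Pre_wrong x → Spec_wrong x (wrong x)

-- ===== LEMMAS AND PROOFS =====

-- reading another row after a write
lemma tget_tset_ne_row (t : List (List Int)) (a b v p q : Int)
    (ha : 0 ≤ a) (hp : 0 ≤ p) (hne : p ≠ a) :
    tget (tset t a b v) p q = tget t p q := by
  unfold tget tset
  rw [PySem.List.pySetD_of_nonneg _ _ ha]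
  by_cases hpl : p < (t.length : Int)
  · rw [PySem.List.pyGetD_eq_getElem _ _ hp (by
      rw [List.length_set]; exact hpl),
      PySem.List.pyGetD_eq_getElem _ _ hp hpl,
      List.getElem_set, if_neg (by omega)]
  · have h1 : PySem.List.pyGet? (t.set a.toNat (PySem.List.pySetD (PySem.List.pyGetD t a []) b v)) p = none := by
      rw [PySem.List.pyGet?_eq_none_iff]
      simp only [PySem.Raise.InRange, List.length_set]
      omega
    have h2 : PySem.List.pyGet? t p = none := by
      rw [PySem.List.pyGet?_eq_none_iff]
      simp only [PySem.Raise.InRange]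
      omega
    rw [PySem.List.pyGetD_of_none _ _ _ h1, PySem.List.pyGetD_of_none _ _ _ h2]

-- reading the written row after a write
lemma tget_tset_row (t : List (List Int)) (a b v q : Int)
    (ha : 0 ≤ a) (hb : 0 ≤ b) (hq : 0 ≤ q) :
    tget (tset t a b v) a q =
      if q = b ∧ a < (t.length : Int) ∧ b < ((PySem.List.pyGetD t a []).length : Int) then v
      else tget t a q := by
  unfold tget tset
  rw [PySem.List.pySetD_of_nonneg _ _ ha]
  by_cases hal : a < (t.length : Int)
  · rw [PySem.List.pyGetD_eq_getElem (t.set a.toNat (PySem.List.pySetD (PySem.List.pyGetD t a []) b v)) _ ha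
      (by rw [List.length_set]; exact hal)]
    rw [List.getElem_set, if_pos rfl]
    rw [PySem.List.pySetD_of_nonneg _ _ hb]
    by_cases hql : q < (((PySem.List.pyGetD t a []).set b.toNat v).length : Int)
    · rw [PySem.List.pyGetD_eq_getElem _ _ hq hql, List.getElem_set]
      rw [List.length_set] at hql
      by_cases hqb : q = b
      · subst hqb
        rw [if_pos rfl, if_pos ⟨rfl, hal, by omega⟩]
      · rw [if_neg (by omega), if_neg (by omega),
          PySem.List.pyGetD_eq_getElem _ _ hq (by omega)]
    · rw [List.length_set] at hql
      have h1 : PySem.List.pyGet? ((PySem.List.pyGetD t a []).set b.toNat v) q = none := by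
        rw [PySem.List.pyGet?_eq_none_iff]
        simp only [PySem.Raise.InRange, List.length_set]
        omega
      have h2 : PySem.List.pyGet? (PySem.List.pyGetD t a []) q = none := by
        rw [PySem.List.pyGet?_eq_none_iff]
        simp only [PySem.Raise.InRange]
        omega
      rw [PySem.List.pyGetD_of_none _ _ _ h1, PySem.List.pyGetD_of_none _ _ _ h2,
        if_neg (by omega)]
  · have hset : t.set a.toNat (PySem.List.pySetD (PySem.List.pyGetD t a []) b v) = t := by
      apply List.set_eq_of_length_le
      omega
    rw [hset, if_neg (by omega)]

-- every cell of an all-zero table reads 0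
lemma tget_all_zero (t : List (List Int)) (h : ∀ r ∈ t, ∀ y ∈ r, y = 0) (a b : Int) :
    tget t a b = 0 := by
  unfold tget
  have hrow : ∀ y ∈ PySem.List.pyGetD t a ([] : List Int), y = (0 : Int) := by
    by_cases hin : PySem.Raise.InRange t.length a
    · exact h _ (PySem.List.pyGetD_mem t _ hin)
    · rw [PySem.List.pyGetD_of_none _ _ _ ((PySem.List.pyGet?_eq_none_iff t a).mpr hin)]
      intro y hy
      exact absurd hy (List.not_mem_nil)
  by_cases hin : PySem.Raise.InRange (PySem.List.pyGetD t a ([] : List Int)).length b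
  · exact hrow _ (PySem.List.pyGetD_mem _ _ hin)
  · rw [PySem.List.pyGetD_of_none _ _ _ ((PySem.List.pyGet?_eq_none_iff _ b).mpr hin)]

-- shape: an (x+1) x (x+1) table
def pvShp (x : Int) (t : List (List Int)) : Prop :=
  (t.length : Int) = x + 1 ∧ ∀ r ∈ t, (r.length : Int) = x + 1

lemma pvShp_row (x : Int) (t : List (List Int)) (n : Int) (h : pvShp x t)
    (hn : 0 ≤ n) (hnx : n < x + 1) :
    ((PySem.List.pyGetD t n ([] : List Int)).length : Int) = x + 1 := by
  obtain ⟨hl, hrows⟩ := h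
  exact hrows _ (PySem.List.pyGetD_mem t _ (by
    simp only [PySem.Raise.InRange]
    omega))

lemma pvShp_tset (x : Int) (t : List (List Int)) (a b v : Int) (h : pvShp x t) (ha : 0 ≤ a) :
    pvShp x (tset t a b v) := by
  obtain ⟨hl, hrows⟩ := h
  unfold tset
  by_cases hal : a < (t.length : Int)
  · constructor
    · rw [PySem.List.length_pySetD]
      exact hl
    · intro r hr
      rw [PySem.List.pySetD_of_nonneg _ _ ha] at hr
      rcases List.mem_or_eq_of_mem_set hr with hmem | heq
      · exact hrows r hmem
      · subst heq
        rw [PySem.List.length_pySetD]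
        exact pvShp_row x t a ⟨hl, hrows⟩ ha (by omega)
  · rw [PySem.List.pySetD_of_nonneg _ _ ha, List.set_eq_of_length_le (by omega)]
    exact ⟨hl, hrows⟩

-- prefix sum of table T along anti-diagonal n, rows 0..i (columns clamped to [0,x])
def pvDsum (x : Int) (T : List (List Int)) (n i : Int) : Int :=
  ((PySem.List.pyRange 0 (i + 1) 1).map
    (fun k => if 0 ≤ n - k ∧ n - k ≤ x then tget T k (n - k) else 0)).sum

lemma pvDsum_succ (x : Int) (T : List (List Int)) (n i : Int) (h : 0 ≤ i) :
    pvDsum x T n i = pvDsum x T n (i - 1) + (if 0 ≤ n - i ∧ n - i ≤ x then tget T i (n - i) else 0) := by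
  unfold pvDsum
  have h1 : i - 1 + 1 = i := by ring
  rw [h1, PySem.List.pyRange_one_succ_right h, List.map_append, List.sum_append]
  simp

lemma pvDsum_congr (x : Int) (T T' : List (List Int)) (n i : Int)
    (h : ∀ k v, 0 ≤ k → k ≤ i → tget T k v = tget T' k v) :
    pvDsum x T n i = pvDsum x T' n i := by
  unfold pvDsum
  congr 1
  apply List.map_congr_left
  intro a ha
  rw [PySem.List.mem_pyRange_one] at ha
  by_cases hg : 0 ≤ n - a ∧ n - a ≤ x
  · rw [if_pos hg, if_pos hg, h a (n - a) (by omega) (by omega)]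
  · rw [if_neg hg, if_neg hg]

lemma pvDsum_sub (x : Int) (T : List (List Int)) (n j i : Int) (hj : -1 ≤ j) (hji : j ≤ i) :
    pvDsum x T n i - pvDsum x T n j =
      ((PySem.List.pyRange (j + 1) (i + 1) 1).map
        (fun k => if 0 ≤ n - k ∧ n - k ≤ x then tget T k (n - k) else 0)).sum := by
  unfold pvDsum
  rw [PySem.List.pyRange_one_append 0 (j + 1) (i + 1) (by omega) (by omega),
    List.map_append, List.sum_append]
  ring

-- the P-extension fold of pvStep, named for the proofs
def pvPext (x m : Int) (T : List (List Int)) (a : Int) (P0 : List (List Int)) : List (List Int) :=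
  (PySem.List.pyRange a (x + 1) 1).foldl
    (fun P n => tset P n (m - 1)
      (tget P n (m - 2) +
        (if 0 ≤ n - (m - 1) ∧ n - (m - 1) ≤ x then tget T (m - 1) (n - (m - 1)) else 0)))
    P0

-- the P-extension loop writes exactly the cells (n, m-1) for 0 ≤ n ≤ x
lemma pstep_P_char (x m : Int) (T : List (List Int)) (h3 : 3 ≤ m) (hmx : m < x) (k : Nat) :
    ∀ (a : Int) (P0 : List (List Int)), (x + 1 - a).toNat ≤ k → 0 ≤ a → pvShp x P0 →
    pvShp x (pvPext x m T a P0)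
    ∧ ∀ n i, 0 ≤ n → 0 ≤ i →
      tget (pvPext x m T a P0) n i
      = if a ≤ n ∧ n < x + 1 ∧ i = m - 1 then
          tget P0 n (m - 2) +
            (if 0 ≤ n - (m - 1) ∧ n - (m - 1) ≤ x then tget T (m - 1) (n - (m - 1)) else 0)
        else tget P0 n i := by
  induction k with
  | zero =>
    intro a P0 hk ha hS
    rw [pvPext, PySem.List.pyRange_one_eq_nil (a := a) (b := x + 1) (by omega)]
    exact ⟨hS, fun n i hn hi => by rw [List.foldl_nil, if_neg (by omega)]⟩
  | succ k ih =>
    intro a P0 hk ha hS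
    by_cases hab : x + 1 ≤ a
    · rw [pvPext, PySem.List.pyRange_one_eq_nil (a := a) (b := x + 1) hab]
      exact ⟨hS, fun n i hn hi => by rw [List.foldl_nil, if_neg (by omega)]⟩
    · have hstep : pvPext x m T a P0 = pvPext x m T (a + 1)
          (tset P0 a (m - 1)
            (tget P0 a (m - 2) +
              (if 0 ≤ a - (m - 1) ∧ a - (m - 1) ≤ x then tget T (m - 1) (a - (m - 1)) else 0))) := by
        rw [pvPext, pvPext, PySem.List.pyRange_one_cons (by omega : a < x + 1), List.foldl_cons]
      have hS1 : pvShp x (tset P0 a (m - 1)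
          (tget P0 a (m - 2) +
            (if 0 ≤ a - (m - 1) ∧ a - (m - 1) ≤ x then tget T (m - 1) (a - (m - 1)) else 0))) :=
        pvShp_tset x P0 a (m - 1) _ hS ha
      obtain ⟨ihS, ihF⟩ := ih (a + 1) _ (by omega) (by omega) hS1
      refine ⟨by rw [hstep]; exact ihS, ?_⟩
      intro n i hn hi
      rw [hstep, ihF n i hn hi]
      by_cases hna : n = a
      · subst hna
        rw [if_neg (by omega)]
        rw [tget_tset_row P0 n (m - 1) _ i hn (by omega) hi]
        have hl1 : (P0.length : Int) = x + 1 := hS.1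
        have hl2 : ((PySem.List.pyGetD P0 n ([] : List Int)).length : Int) = x + 1 :=
          pvShp_row x P0 n hS hn (by omega)
        by_cases him : i = m - 1
        · rw [if_pos (by omega : i = m - 1 ∧ n < (P0.length : Int) ∧ m - 1 < ((PySem.List.pyGetD P0 n ([] : List Int)).length : Int)),
            if_pos (by omega : n ≤ n ∧ n < x + 1 ∧ i = m - 1)]
        · rw [if_neg (by omega), if_neg (by omega)]
      · have hng : ∀ q, tget (tset P0 a (m - 1)
            (tget P0 a (m - 2) +
              (if 0 ≤ a - (m - 1) ∧ a - (m - 1) ≤ x then tget T (m - 1) (a - (m - 1)) else 0))) n q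
            = tget P0 n q := fun q => tget_tset_ne_row P0 a (m - 1) _ n q ha hn hna
        simp only [hng]
        have hc : (a + 1 ≤ n ∧ n < x + 1 ∧ i = m - 1) ↔ (a ≤ n ∧ n < x + 1 ∧ i = m - 1) := by
          omega
        simp only [hc]

-- the two inner loops agree and touch only row m
lemma inner_eq (x m : Int) (h3 : 3 ≤ m) (hmx : m < x) (k : Nat) :
    ∀ (c : Int) (T P : List (List Int)), (x - c).toNat ≤ k → 1 ≤ c →
    (∀ a b, m + 1 ≤ a → tget T a b = 0) →
    (∀ b, c ≤ b → tget T m b = 0) →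
    (∀ n i, 0 ≤ n → n ≤ x → 0 ≤ i → i ≤ m - 1 → tget P n i = pvDsum x T n i) →
    wrongInner m (PySem.List.pyRange c x 1) T = wrongAltInner m P (PySem.List.pyRange c x 1) T
    ∧ ∀ a b, 0 ≤ a → a ≠ m → tget (wrongInner m (PySem.List.pyRange c x 1) T) a b = tget T a b := by
  induction k with
  | zero =>
    intro c T P hk hc _ _ _
    rw [PySem.List.pyRange_one_eq_nil (a := c) (b := x) (by omega)]
    exact ⟨rfl, fun a b _ _ => rfl⟩
  | succ k ih =>
    intro c T P hk hc hzero hrow hpfx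
    by_cases hxc : x ≤ c
    · rw [PySem.List.pyRange_one_eq_nil (a := c) (b := x) hxc]
      exact ⟨rfl, fun a b _ _ => rfl⟩
    have hv : (if m ≤ c then
          (PySem.List.pyRange (1 + c - m) m 1).foldl (fun s i => s + tget T i (c - i)) (tget T m c)
        else 1 + tget T c c)
        = (if m ≤ c then (if c ≤ 2 * m - 2 then tget P c (m - 1) - tget P c (c - m) else 0)
           else 1 + tget T c c) := by
      by_cases hmc : m ≤ c
      · rw [if_pos hmc, if_pos hmc,
          show List.foldl (fun s i => s + tget T i (c - i)) (tget T m c)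
              (PySem.List.pyRange (1 + c - m) m 1)
            = tget T m c + ((PySem.List.pyRange (1 + c - m) m 1).map (fun i => tget T i (c - i))).sum
            from PySem.List.foldl_add _ _ _,
          hrow c le_rfl]
        by_cases h2 : c ≤ 2 * m - 2
        · rw [if_pos h2, hpfx c (m - 1) (by omega) (by omega) (by omega) (by omega),
            hpfx c (c - m) (by omega) (by omega) (by omega) (by omega),
            pvDsum_sub x T c (c - m) (m - 1) (by omega) (by omega)]
          have he : c - m + 1 = 1 + c - m := by ring
          have he2 : m - 1 + 1 = m := by ring
          rw [he, he2]
          have hmap : (PySem.List.pyRange (1 + c - m) m 1).map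
              (fun k => if 0 ≤ c - k ∧ c - k ≤ x then tget T k (c - k) else 0)
              = (PySem.List.pyRange (1 + c - m) m 1).map (fun i => tget T i (c - i)) := by
            apply List.map_congr_left
            intro a ha
            rw [PySem.List.mem_pyRange_one] at ha
            rw [if_pos ⟨by omega, by omega⟩]
          rw [hmap]
          ring
        · rw [if_neg h2,
            PySem.List.pyRange_one_eq_nil (a := 1 + c - m) (b := m) (by omega)]
          simp
      · rw [if_neg hmc, if_neg hmc]
    rw [PySem.List.pyRange_one_cons (by omega : c < x)]
    simp only [wrongInner, wrongAltInner]
    rw [hv]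
    set v : Int := (if m ≤ c then (if c ≤ 2 * m - 2 then tget P c (m - 1) - tget P c (c - m) else 0)
        else 1 + tget T c c) with hvdef
    by_cases hv0 : v = 0
    · rw [if_pos hv0, if_pos hv0]
      exact ⟨rfl, fun a b ha hne => tget_tset_ne_row T m c v a b (by omega) ha hne⟩
    · rw [if_neg hv0, if_neg hv0]
      have hz' : ∀ a b, m + 1 ≤ a → tget (tset T m c v) a b = 0 := by
        intro a b hamc
        rw [tget_tset_ne_row T m c v a b (by omega) (by omega) (by omega)]
        exact hzero a b hamc
      have hrow' : ∀ b, c + 1 ≤ b → tget (tset T m c v) m b = 0 := by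
        intro b hb
        rw [tget_tset_row T m c v b (by omega) (by omega) (by omega), if_neg (by omega)]
        exact hrow b (by omega)
      have hpfx' : ∀ n i, 0 ≤ n → n ≤ x → 0 ≤ i → i ≤ m - 1 →
          tget P n i = pvDsum x (tset T m c v) n i := by
        intro n i hn hnx hi him
        refine (hpfx n i hn hnx hi him).trans ?_
        exact pvDsum_congr x T (tset T m c v) n i
          (fun p q hp hpi => (tget_tset_ne_row T m c v p q (by omega) hp (by omega)).symm)
      obtain ⟨h1, h2⟩ := ih (c + 1) (tset T m c v) P (by omega) (by omega) hz' hrow' hpfx'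
      refine ⟨h1, fun a b ha hne => ?_⟩
      rw [h2 a b ha hne, tget_tset_ne_row T m c v a b (by omega) ha hne]

-- the outer m-loops stay in lockstep
lemma outer_eq (x : Int) (k : Nat) :
    ∀ (m : Int) (T P : List (List Int)), (x - m).toNat ≤ k → 3 ≤ m →
    pvShp x P →
    (∀ a b, m ≤ a → tget T a b = 0) →
    (∀ n i, 0 ≤ n → n ≤ x → 0 ≤ i → i ≤ m - 2 → tget P n i = pvDsum x T n i) →
    (PySem.List.pyRange m x 1).foldl
      (fun t m' => wrongInner m' (PySem.List.pyRange 1 x 1) t) T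
    = ((PySem.List.pyRange m x 1).foldl (fun st m' => pvStep x st m') (T, P)).1 := by
  induction k with
  | zero =>
    intro m T P hk h3 _ _ _
    rw [PySem.List.pyRange_one_eq_nil (a := m) (b := x) (by omega)]
    rfl
  | succ k ih =>
    intro m T P hk h3 hSP hzero hpfx
    by_cases hxm : x ≤ m
    · rw [PySem.List.pyRange_one_eq_nil (a := m) (b := x) hxm]
      rfl
    rw [PySem.List.pyRange_one_cons (by omega : m < x), List.foldl_cons, List.foldl_cons]
    have hstep : pvStep x (T, P) m =
        (wrongAltInner m (pvPext x m T 0 P) (PySem.List.pyRange 1 x 1) T, pvPext x m T 0 P) := rfl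
    rw [hstep]
    obtain ⟨hS', hF⟩ := pstep_P_char x m T h3 (by omega) (x + 1).toNat 0 P (by omega) le_rfl hSP
    have hP' : ∀ n i, 0 ≤ n → n ≤ x → 0 ≤ i → i ≤ m - 1 →
        tget (pvPext x m T 0 P) n i = pvDsum x T n i := by
      intro n i hn hnx hi him
      rw [hF n i hn hi]
      by_cases hi1 : i = m - 1
      · rw [if_pos ⟨by omega, by omega, hi1⟩, hi1,
          hpfx n (m - 2) (by omega) (by omega) (by omega) (by omega),
          pvDsum_succ x T n (m - 1) (by omega)]
        have h21 : m - 1 - 1 = m - 2 := by ring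
        rw [h21]
      · rw [if_neg (by omega)]
        exact hpfx n i hn hnx hi (by omega)
    obtain ⟨h1, h2⟩ := inner_eq x m h3 (by omega) (x - 1).toNat 1 T (pvPext x m T 0 P) (by omega)
      le_rfl (fun a b ha => hzero a b (by omega)) (fun b _ => hzero m b le_rfl) hP'
    rw [← h1]
    apply ih (m + 1) (wrongInner m (PySem.List.pyRange 1 x 1) T) (pvPext x m T 0 P)
      (by omega) (by omega) hS'
    · intro a b ha
      rw [h2 a b (by omega) (by omega)]
      exact hzero a b (by omega)
    · intro n i hn hnx hi him
      rw [hP' n i hn hnx hi (by omega)]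
      exact pvDsum_congr x T (wrongInner m (PySem.List.pyRange 1 x 1) T) n i
        (fun p q hp hpi => (h2 p q hp (by omega)).symm)

-- ===== VERDICT (by name: the statement is the Claim_ definition above) =====
theorem wrong_spec : Claim_equal_wrong := by
  unfold Claim_equal_wrong Spec_wrong
  intro x _ hpre
  have hzt : ∀ r ∈ (PySem.List.pyRange 0 (x + 1) 1).map
      (fun _ => (PySem.List.pyRange 0 (x + 1) 1).map (fun _ => (0 : Int))), ∀ y ∈ r, y = (0 : Int) := by
    intro r hr y hy
    rw [List.mem_map] at hr
    obtain ⟨_, _, rfl⟩ := hr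
    rw [List.mem_map] at hy
    obtain ⟨_, _, rfl⟩ := hy
    rfl
  have hpre2 : (2 : Int) ≤ x := hpre
  simp only [wrong, wrong_alt]
  rw [outer_eq x (x - 3).toNat 3
    (tset ((PySem.List.pyRange 0 (x + 1) 1).map
      (fun _ => (PySem.List.pyRange 0 (x + 1) 1).map (fun _ => (0 : Int)))) 2 1 1)
    ((PySem.List.pyRange 0 (x + 1) 1).map
      (fun _ => (PySem.List.pyRange 0 (x + 1) 1).map (fun _ => (0 : Int))))
    le_rfl le_rfl
    (by
      constructor
      · rw [List.length_map, PySem.List.length_pyRange_one]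
        omega
      · intro r hr
        rw [List.mem_map] at hr
        obtain ⟨_, _, rfl⟩ := hr
        rw [List.length_map, PySem.List.length_pyRange_one]
        omega)
    (by
      intro a b ha
      rw [tget_tset_ne_row _ 2 1 1 a b (by omega) (by omega) (by omega)]
      exact tget_all_zero _ hzt a b)
    (by
      intro n i hn hnx hi him
      rw [tget_all_zero _ hzt n i]
      unfold pvDsum
      symm
      apply List.sum_eq_zero
      intro y hy
      rw [List.mem_map] at hy
      obtain ⟨a, ha, rfl⟩ := hy
      rw [PySem.List.mem_pyRange_one] at ha
      rw [tget_tset_ne_row _ 2 1 1 a (n - a) (by omega) (by omega) (by omega),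
        tget_all_zero _ hzt a (n - a)]
      split_ifs <;> rfl)]
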